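-- pv_equiv track=rewrite | github.com/MT-Hackathon/scion | .cursor/skills/codebase-sense/scripts/query-cascade.py | path_matches
-- ===== SOURCE A (Python) =====
-- def path_matches(candidate: str, variants: set[str]) -> bool:
--     normalized = candidate.replace("\\", "/").strip()
--     if not normalized:
--         return False
--     for variant in variants:
--         if normalized == variant or normalized.endswith(f"/{variant}"):
--             return True
--     return False
-- ===== SOURCE B (Python) =====
-- def path_matches(candidate: str, variants: set[str]) -> bool:
--     normalized = candidate.replace("\\", "/").strip()
--     if not normalized:
--         return False
--     vset = set(variants)
--     if normalized in vset:
--         return True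
--     return any(ch == "/" and normalized[i + 1:] in vset
--                for i, ch in enumerate(normalized))
-- ===== Notes on version B (the rewrite author's own statement) =====
-- stated objective: alternative
-- what changed: Instead of scanning all variants and testing equality/endswith for each, B enumerates the candidate's '/'-boundary suffixes once and tests each for membership in a set built from the variants; it trades a per-variant endswith scan for a per-slash set lookup.
import Mathlib
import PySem

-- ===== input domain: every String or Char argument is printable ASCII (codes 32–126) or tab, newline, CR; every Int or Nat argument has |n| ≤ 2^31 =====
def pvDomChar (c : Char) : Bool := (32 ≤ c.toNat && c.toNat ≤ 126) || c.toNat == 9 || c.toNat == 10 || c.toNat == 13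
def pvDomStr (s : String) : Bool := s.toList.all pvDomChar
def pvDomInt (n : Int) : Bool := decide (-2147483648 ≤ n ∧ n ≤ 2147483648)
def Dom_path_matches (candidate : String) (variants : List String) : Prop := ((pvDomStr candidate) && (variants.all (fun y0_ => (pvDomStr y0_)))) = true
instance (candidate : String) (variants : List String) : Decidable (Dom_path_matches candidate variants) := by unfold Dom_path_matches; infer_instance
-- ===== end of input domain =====

-- B inverts A: rather than testing equality/endswith per variant, it enumerates the
-- normalized candidate's '/'-boundary suffixes and looks each up in a set of the variants.

-- ===== PORT A =====
def path_matches (candidate : String) (variants : List String) : Bool :=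
  let normalized := PySem.Str.strip (PySem.Str.replace candidate "\\" "/")
  if normalized = "" then false
  else variants.any (fun variant =>
    normalized == variant || PySem.Str.endswith normalized ("/" ++ variant))

-- ===== PORT B =====
-- the 'any(... for i, ch in enumerate(normalized))' loop: at each char, if it is '/',
-- test the suffix after it (normalized[i+1:], here the tail of the recursion) for membership
def pathSuffAny (vset : PySem.Set String) : List Char → Bool
  | [] => false
  | c :: rest => (c == '/' && PySem.Set.contains vset (String.ofList rest)) || pathSuffAny vset rest

def path_matches_alt (candidate : String) (variants : List String) : Bool :=
  let normalized := PySem.Str.strip (PySem.Str.replace candidate "\\" "/")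
  if normalized = "" then false
  else
    let vset := PySem.Set.ofList variants
    if PySem.Set.contains vset normalized then true
    else pathSuffAny vset normalized.toList

-- ===== PRECONDITION & SPEC =====
def Spec_path_matches (candidate : String) (variants : List String) (out : Bool) : Prop := out = path_matches_alt candidate variants
instance (candidate : String) (variants : List String) (out : Bool) : Decidable (Spec_path_matches candidate variants out) := by unfold Spec_path_matches; infer_instance

-- ===== CLAIM (what is proved, stated in full; the proofs are below) =====
def Claim_equal_path_matches : Prop := ∀ (candidate : String) (variants : List String), Dom_path_matches candidate variants → Spec_path_matches candidate variants (path_matches candidate variants)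

-- ===== LEMMAS AND PROOFS =====

lemma pathSuffAny_iff (vs : PySem.Set String) (cs : List Char) :
    pathSuffAny vs cs = true ↔ ∃ v ∈ vs, ('/' :: v.toList) <:+ cs := by
  induction cs with
  | nil =>
    simp [pathSuffAny, List.suffix_nil]
  | cons c rest ih =>
    simp only [pathSuffAny, Bool.or_eq_true, Bool.and_eq_true, beq_iff_eq, ih]
    constructor
    · rintro (⟨hc, hmem⟩ | ⟨v, hv, hsuf⟩)
      · refine ⟨String.ofList rest, by simpa using hmem, ?_⟩
        rw [hc]
        simp
      · exact ⟨v, hv, hsuf.trans (List.suffix_cons c rest)⟩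
    · rintro ⟨v, hv, hsuf⟩
      rcases List.suffix_cons_iff.mp hsuf with heq | hsuf'
      · obtain ⟨hc, hrest⟩ := List.cons_eq_cons.mp heq
        subst hrest
        refine Or.inl ⟨hc.symm, ?_⟩
        simpa using hv
      · exact Or.inr ⟨v, hv, hsuf'⟩

lemma any_eq_branches (n : String) (hn : n ≠ "") (vs : List String) :
    (vs.any fun v => n == v || PySem.Str.endswith n ("/" ++ v)) =
      (if PySem.Set.contains (PySem.Set.ofList vs) n then true
       else pathSuffAny (PySem.Set.ofList vs) n.toList) := by
  by_cases hmem : n ∈ vs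
  · have : PySem.Set.contains (PySem.Set.ofList vs) n = true := by
      simp [PySem.Set.mem_ofList, hmem]
    rw [this]
    simp only [if_true]
    rw [List.any_eq_true]
    exact ⟨n, hmem, by simp⟩
  · have hcon : PySem.Set.contains (PySem.Set.ofList vs) n = false := by
      simp [PySem.Set.mem_ofList, hmem]
    rw [hcon]
    simp only [if_false, Bool.false_eq_true]
    rw [Bool.eq_iff_iff, List.any_eq_true, pathSuffAny_iff]
    constructor
    · rintro ⟨v, hv, h⟩
      rcases Bool.or_eq_true .. |>.mp h with heq | hend
      · exact absurd ((beq_iff_eq).mp heq ▸ hv) hmem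
      · refine ⟨v, by simp [PySem.Set.mem_ofList, hv], ?_⟩
        have := PySem.Chars.endswith_iff (s := n.toList) (p := ("/" ++ v).toList) |>.mp
          (by simpa using hend)
        simpa using this
    · rintro ⟨v, hv, hsuf⟩
      refine ⟨v, by simpa [PySem.Set.mem_ofList] using hv, ?_⟩
      apply Bool.or_eq_true .. |>.mpr
      right
      have : PySem.Chars.endswith n.toList (("/" ++ v).toList) = true :=
        PySem.Chars.endswith_iff .. |>.mpr (by simpa using hsuf)
      simpa using this

-- ===== VERDICT (by name: the statement is the Claim_ definition above) =====
theorem path_matches_spec : Claim_equal_path_matches := by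
  intro candidate variants _
  unfold Spec_path_matches path_matches path_matches_alt
  set n := PySem.Str.strip (PySem.Str.replace candidate "\\" "/")
  by_cases h : n = ""
  · simp [h]
  · simp only [if_neg h]
    exact any_eq_branches n h variants
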